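-- pv_equiv track=rewrite | github.com/DigijEth/autarch | core/menu.py | _is_huggingface_id
-- ===== SOURCE A (Python) =====
-- def _is_huggingface_id(path: str) -> bool:
--     """Check if the path looks like a HuggingFace model ID.
--
--     Args:
--         path: The path/ID to check
--
--     Returns:
--         True if it looks like a HuggingFace model ID (org/model-name)
--     """
--     if not path:
--         return False
--     if path.startswith('/') or path.startswith('\\'):
--         return False
--     parts = path.split('/')
--     if len(parts) == 2 and all(p and not p.startswith('.') for p in parts):
--         return True
--     return False
-- ===== SOURCE B (Python) =====
-- def _is_huggingface_id(path: str) -> bool: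
--     """Single left-to-right scan with a tiny state machine: no split(), no
--     intermediate list, early exit on the first violation."""
--     if not path or path[0] in '/.\\':
--         return False
--     seen_slash = False   # a '/' has been passed
--     prev_slash = False   # the previous character was that '/'
--     for c in path[1:]:
--         if c == '/':
--             if seen_slash:
--                 return False
--             seen_slash = True
--             prev_slash = True
--         else:
--             if prev_slash and c == '.':
--                 return False
--             prev_slash = False
--     return seen_slash and not prev_slash
-- ===== Notes on version B (the rewrite author's own statement) =====
-- stated objective: alternative
-- what changed: Replaces the split-on-separator plus all() pass over the resulting parts list with a single left-to-right character scan (two-flag state machine, early exit) that never builds the parts list.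
import Mathlib
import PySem

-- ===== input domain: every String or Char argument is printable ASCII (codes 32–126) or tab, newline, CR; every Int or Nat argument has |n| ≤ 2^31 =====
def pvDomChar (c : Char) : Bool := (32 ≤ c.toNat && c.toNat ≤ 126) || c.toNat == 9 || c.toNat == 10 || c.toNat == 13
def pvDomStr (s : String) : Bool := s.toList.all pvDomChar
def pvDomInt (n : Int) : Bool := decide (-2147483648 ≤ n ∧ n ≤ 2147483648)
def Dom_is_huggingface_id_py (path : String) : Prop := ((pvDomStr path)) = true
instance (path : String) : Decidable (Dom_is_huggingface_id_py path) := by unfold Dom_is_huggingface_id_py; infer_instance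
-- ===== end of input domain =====

-- B replaces split('/') + all() with a single character scan (state machine, early exit); same return value everywhere.

-- ===== PORT A =====
def is_huggingface_id_py (path : String) : Bool :=
  -- if not path: return False
  if path.toList = [] then false
  -- if path.startswith('/') or path.startswith('\\'): return False
  else if PySem.Str.startswith path "/" || PySem.Str.startswith path "\\" then false
  else
    -- parts = path.split('/')
    let parts := PySem.Chars.splitOn path.toList ['/']
    -- if len(parts) == 2 and all(p and not p.startswith('.') for p in parts): return True
    if parts.length = 2 ∧ parts.all (fun p => p ≠ [] && !(PySem.Chars.startswith p ['.'])) then true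
    else false

-- ===== PORT B =====
-- the for-loop of Source B over path[1:], with its two flags as parameters
def hfAltGo : List Char → Bool → Bool → Bool
  | [], seen, prev => seen && !prev
  | c :: rest, seen, prev =>
    if c = '/' then
      if seen then false else hfAltGo rest true true
    else if prev && c = '.' then false
    else hfAltGo rest seen false

def is_huggingface_id_py_alt (path : String) : Bool :=
  match path.toList with
  | [] => false                                    -- not path
  | c :: rest =>
    if c = '/' ∨ c = '.' ∨ c = '\\' then false     -- path[0] in '/.\\'
    else hfAltGo rest false false

-- ===== PRECONDITION & SPEC =====
def Spec_is_huggingface_id_py (path : String) (out : Bool) : Prop := out = is_huggingface_id_py_alt path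
instance (path : String) (out : Bool) : Decidable (Spec_is_huggingface_id_py path out) := by unfold Spec_is_huggingface_id_py; infer_instance

-- ===== CLAIM (what is proved, stated in full; the proofs are below) =====
def Claim_equal_is_huggingface_id_py : Prop := ∀ (path : String), Dom_is_huggingface_id_py path → Spec_is_huggingface_id_py path (is_huggingface_id_py path)

-- ===== LEMMAS AND PROOFS =====

-- split on the single character '/', as a plain structural recursion: (first part, remaining parts)
def splitCh : List Char → List Char × List (List Char)
  | [] => ([], [])
  | c :: l =>
    let r := splitCh l
    if c = '/' then ([], r.1 :: r.2) else (c :: r.1, r.2)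

theorem splitOn_go_inv (s : List Char) : ∀ (fuel : Nat) (cur : List Char) (acc : List (List Char)),
    s.length < fuel →
    PySem.Chars.splitOn.go ['/'] fuel s cur acc
      = acc.reverse ++ (cur.reverse ++ (splitCh s).1) :: (splitCh s).2 := by
  induction s with
  | nil =>
    intro fuel cur acc h
    cases fuel with
    | zero => omega
    | succ f => simp [PySem.Chars.splitOn.go, splitCh]
  | cons c rest ih =>
    intro fuel cur acc h
    cases fuel with
    | zero => omega
    | succ f =>
      by_cases hc : c = '/'
      · subst hc
        rw [show PySem.Chars.splitOn.go ['/'] (f+1) ('/' :: rest) cur acc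
              = PySem.Chars.splitOn.go ['/'] f rest [] (cur.reverse :: acc) by
            simp [PySem.Chars.splitOn.go, List.isPrefixOf]]
        rw [ih f [] (cur.reverse :: acc) (by simpa using h)]
        simp [splitCh]
      · rw [show PySem.Chars.splitOn.go ['/'] (f+1) (c :: rest) cur acc
              = PySem.Chars.splitOn.go ['/'] f rest (c :: cur) acc by
            simp [PySem.Chars.splitOn.go, List.isPrefixOf, Ne.symm hc]]
        rw [ih f (c :: cur) acc (by simpa using h)]
        simp [splitCh, hc]

theorem splitOn_eq_splitCh (s : List Char) :
    PySem.Chars.splitOn s ['/'] = (splitCh s).1 :: (splitCh s).2 := by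
  rw [PySem.Chars.splitOn, splitOn_go_inv s (s.length + 1) [] [] (by omega)]
  simp

-- one Python part is truthy and does not start with '.'
def goodPart : List Char → Bool
  | [] => false
  | d :: _ => d ≠ '.'

-- the three reachable states of the scan, characterised by splitCh of the rest
theorem hfAltGo_spec (rest : List Char) :
    (hfAltGo rest true false = decide ((splitCh rest).2 = []))
    ∧ (hfAltGo rest true true
        = (decide ((splitCh rest).2 = []) && goodPart (splitCh rest).1))
    ∧ (hfAltGo rest false false
        = (match (splitCh rest).2 with
           | [y] => goodPart y
           | _ => false)) := by
  induction rest with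
  | nil => simp [hfAltGo, splitCh, goodPart]
  | cons c r ih =>
    obtain ⟨ih1, ih2, ih3⟩ := ih
    by_cases hc : c = '/'
    · subst hc
      refine ⟨by simp [hfAltGo, splitCh], by simp [hfAltGo, splitCh], ?_⟩
      rw [show hfAltGo ('/' :: r) false false = hfAltGo r true true by simp [hfAltGo]]
      rw [ih2]
      rcases hxs : (splitCh r).2 with _ | ⟨z, zs⟩ <;> simp [splitCh, hxs]
    · by_cases hd : c = '.'
      · subst hd
        refine ⟨?_, ?_, ?_⟩ <;>
          simp [hfAltGo, splitCh, ih1, ih3, goodPart, hc]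
      · refine ⟨?_, ?_, ?_⟩ <;>
          simp [hfAltGo, splitCh, ih1, ih3, goodPart, hc, hd]

theorem startswith_single (c : Char) (rest : List Char) (d : Char) :
    PySem.Chars.startswith (c :: rest) [d] = decide (c = d) := by
  by_cases h : c = d
  · simp [PySem.Chars.startswith, List.isPrefixOf, h]
  · simp [PySem.Chars.startswith, List.isPrefixOf, h, Ne.symm h]

theorem main_eq (path : String) :
    is_huggingface_id_py path = is_huggingface_id_py_alt path := by
  unfold is_huggingface_id_py is_huggingface_id_py_alt
  cases hl : path.toList with
  | nil => simp
  | cons c rest =>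
    simp only [PySem.Str.startswith_eq, hl, splitOn_eq_splitCh]
    by_cases h1 : c = '/'
    · simp [h1, startswith_single]
    · by_cases h2 : c = '\\'
      · simp [h2, startswith_single]
      · by_cases h3 : c = '.'
        · subst h3
          simp [h1, h2, splitCh, startswith_single]
        · obtain ⟨-, -, ih3⟩ := hfAltGo_spec rest
          rcases hsp : (splitCh rest).2 with _ | ⟨y, ys⟩
          · simp [ih3, hsp, splitCh, h1, h3, startswith_single]
          · rcases ys with _ | ⟨z, zs⟩
            · cases y with
              | nil => simp [ih3, hsp, splitCh, h1, h2, h3, startswith_single, goodPart]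
              | cons d t => simp [ih3, hsp, splitCh, h1, h2, h3, startswith_single, goodPart]
            · simp [ih3, hsp, splitCh, h1, h2, h3, startswith_single]

-- ===== VERDICT (by name: the statement is the Claim_ definition above) =====
theorem is_huggingface_id_py_spec : Claim_equal_is_huggingface_id_py := by
  intro path _
  unfold Spec_is_huggingface_id_py
  exact main_eq path
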